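-- pv_equiv track=rewrite | github.com/kwonyulchoi/yc_2017_swtesting | Report/17-09-14_SpecBasedTesting/21360049/Practice/StateTransitionTest/build_context/bd_common.py | merge_items
-- ===== SOURCE A (Python) =====
-- import copy
--
-- def merge_items(items00,items01,attribute=None):
--     output =[]
--     itemsA = copy.deepcopy(items00)
--     itemsB = copy.deepcopy(items01)
--     for itemB in itemsB:
--         chk_flag = False
--         for itemA in itemsA:
--             if (attribute ==None) :
--                 if itemB[0] == itemA[0]:
--                     # If there is the same item, merge them
--                     chk_flag = True
--                     # merge the item
--                     for item_inner01 in itemB[1]: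
--                         if (  (item_inner01 in itemA[1]) == False ):
--                             itemA[1].append(item_inner01)
--             else:
--                 if itemA[0] == attribute and itemB[0] == itemA[0]:
--                     # If there is the same item, merge them
--                     chk_flag = True
--                     # merge the item
--                     for item_inner01 in itemB[1]:
--                         if (  (item_inner01 in itemA[1]) == False ):
--                             itemA[1].append(item_inner01)
--         if (attribute ==None) :
--             if chk_flag ==False:
--                 # If there is no same item, append it
--                 itemsA.append(itemB)
--     return itemsA
-- ===== SOURCE B (Python) =====
-- def merge_items(items00, items01, attribute=None):
--     entries = [(k, list(v)) for k, v in items00]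
--     if attribute is None:
--         # dict index: key -> list of positions with that key; parallel membership sets
--         index = {}
--         for i, (k, _) in enumerate(entries):
--             index.setdefault(k, []).append(i)
--         sets = [set(v) for _, v in entries]
--         for k, v in items01:
--             idxs = index.get(k)
--             if idxs is None:
--                 index[k] = [len(entries)]
--                 entries.append((k, list(v)))
--                 sets.append(set(v))
--             else:
--                 for i in idxs:
--                     s = sets[i]
--                     lst = entries[i][1]
--                     for x in v:
--                         if x not in s:
--                             s.add(x)
--                             lst.append(x)
--     else:
--         # flatten all matching inner lists once, then one pass over entries
--         stream = [x for k, v in items01 if k == attribute for x in v]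
--         for key, lst in entries:
--             if key == attribute:
--                 s = set(lst)
--                 for x in stream:
--                     if x not in s:
--                         s.add(x)
--                         lst.append(x)
--     return entries
-- ===== Notes on version B (the rewrite author's own statement) =====
-- stated objective: faster
-- what changed: Replaces A's rescan of all of itemsA for every itemB (with a linear 'in' test per inner item) by a dict index from key to entry positions plus a per-entry membership set when attribute is None, and by one flattened stream of matching inner lists merged into each matching entry in a single pass when attribute is given.
import Mathlib
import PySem

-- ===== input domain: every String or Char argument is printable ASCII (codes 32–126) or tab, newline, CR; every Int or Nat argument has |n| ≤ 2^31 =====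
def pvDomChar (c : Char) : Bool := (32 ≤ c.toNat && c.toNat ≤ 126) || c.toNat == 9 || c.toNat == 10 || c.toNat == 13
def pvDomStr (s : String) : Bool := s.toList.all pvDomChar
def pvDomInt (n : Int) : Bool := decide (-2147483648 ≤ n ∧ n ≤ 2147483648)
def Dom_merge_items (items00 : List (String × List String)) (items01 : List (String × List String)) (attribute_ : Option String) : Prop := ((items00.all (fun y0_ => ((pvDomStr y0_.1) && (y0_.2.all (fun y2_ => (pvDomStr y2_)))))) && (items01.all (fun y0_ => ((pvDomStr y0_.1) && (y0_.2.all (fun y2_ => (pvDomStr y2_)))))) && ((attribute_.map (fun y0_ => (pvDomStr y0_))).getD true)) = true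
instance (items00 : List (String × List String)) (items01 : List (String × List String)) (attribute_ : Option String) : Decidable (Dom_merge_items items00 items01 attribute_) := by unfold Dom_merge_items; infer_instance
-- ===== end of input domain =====

-- B replaces A's quadratic scan of itemsA per itemB by a key→positions index (dict) with
-- per-entry membership sets (attribute=None), and by one flattened stream merged into each
-- matching entry (attribute given); objective: faster (removes the inner scans).
-- Equivalence is about the RETURN value; A deep-copies its arguments, so neither mutates them.

def pvDflt : String × List String := ("", [])

-- ===== PORT A =====
-- inner loop 'for item_inner01 in itemB[1]: if not in itemA[1]: itemA[1].append(...)'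
def aInner (bv av : List String) : List String :=
  bv.foldl (fun acc x => if acc.contains x then acc else acc ++ [x]) av

-- one iteration of A's outer 'for itemB in itemsB' (inner 'for itemA in itemsA' + chk_flag)
def aStep (attribute_ : Option String) (itemsA : List (String × List String))
    (itemB : String × List String) : List (String × List String) :=
  let r := itemsA.foldl (fun (p : List (String × List String) × Bool) itemA =>
    match attribute_ with
    | none =>
        if itemB.1 == itemA.1 then (p.1 ++ [(itemA.1, aInner itemB.2 itemA.2)], true)
        else (p.1 ++ [itemA], p.2)
    | some t =>
        if itemA.1 == t && itemB.1 == itemA.1 then (p.1 ++ [(itemA.1, aInner itemB.2 itemA.2)], true)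
        else (p.1 ++ [itemA], p.2)) ([], false)
  match attribute_ with
  | none => if r.2 then r.1 else r.1 ++ [itemB]
  | some _ => r.1

-- copy.deepcopy of immutable values is the identity here
def merge_items (items00 : List (String × List String)) (items01 : List (String × List String)) (attribute_ : Option String) : List (String × List String) :=
  items01.foldl (aStep attribute_) items00

-- ===== PORT B =====
-- 'for x in v: if x not in s: s.add(x); lst.append(x)'
def bInner (s : PySem.Set String) (lst : List String) (v : List String) :
    PySem.Set String × List String :=
  v.foldl (fun p x => if PySem.Set.contains p.1 x then p else (PySem.Set.add p.1 x, p.2 ++ [x]))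
    (s, lst)

-- 'for i, (k, _) in enumerate(entries): index.setdefault(k, []).append(i)'
-- (enumerate indices are kept as Nat: they are list positions, always ≥ 0)
def bIndex (entries : List (String × List String)) : PySem.Dict String (List Nat) :=
  ((List.range entries.length).zip entries).foldl
    (fun d p => PySem.Dict.insert d p.2.1 (PySem.Dict.getD d p.2.1 [] ++ [p.1])) PySem.Dict.empty

-- one iteration of B's 'for k, v in items01' loop (attribute is None); state = (entries, index, sets)
def bStep (st : List (String × List String) × PySem.Dict String (List Nat) × List (PySem.Set String))
    (b : String × List String) :
    List (String × List String) × PySem.Dict String (List Nat) × List (PySem.Set String) :=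
  match PySem.Dict.get? st.2.1 b.1 with
  | none =>
      (st.1 ++ [(b.1, b.2)], PySem.Dict.insert st.2.1 b.1 [st.1.length],
       st.2.2 ++ [PySem.Set.ofList b.2])
  | some idxs =>
      idxs.foldl (fun st i =>
        let p := bInner (st.2.2.getD i PySem.Set.empty) (st.1.getD i pvDflt).2 b.2
        (st.1.set i ((st.1.getD i pvDflt).1, p.2), st.2.1, st.2.2.set i p.1)) st

def merge_items_alt (items00 : List (String × List String)) (items01 : List (String × List String)) (attribute_ : Option String) : List (String × List String) :=
  let entries := items00.map (fun e => (e.1, e.2))   -- [(k, list(v)) for k, v in items00]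
  match attribute_ with
  | none =>
      (items01.foldl bStep (entries, bIndex entries, entries.map (fun e => PySem.Set.ofList e.2))).1
  | some t =>
      let stream := items01.foldl (fun acc (p : String × List String) =>
        if p.1 == t then acc ++ p.2 else acc) ([] : List String)
      entries.map (fun e => if e.1 == t then (e.1, (bInner (PySem.Set.ofList e.2) e.2 stream).2) else e)

-- ===== PRECONDITION & SPEC =====
def Spec_merge_items (items00 : List (String × List String)) (items01 : List (String × List String)) (attribute_ : Option String) (out : List (String × List String)) : Prop := out = merge_items_alt items00 items01 attribute_
instance (items00 : List (String × List String)) (items01 : List (String × List String)) (attribute_ : Option String) (out : List (String × List String)) : Decidable (Spec_merge_items items00 items01 attribute_ out) := by unfold Spec_merge_items; infer_instance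

-- ===== CLAIM (what is proved, stated in full; the proofs are below) =====
def Claim_equal_merge_items : Prop := ∀ (items00 : List (String × List String)) (items01 : List (String × List String)) (attribute_ : Option String), Dom_merge_items items00 items01 attribute_ → Spec_merge_items items00 items01 attribute_ (merge_items items00 items01 attribute_)

-- ===== LEMMAS AND PROOFS =====

-- membership of a set built from a list, as Bool contains
lemma contains_ofList (l : List String) (x : String) :
    List.contains (PySem.Set.ofList l) x = List.contains l x := by
  have h := PySem.Set.mem_ofList l x
  by_cases hx : x ∈ l <;> simp_all

-- bInner with a faithful membership set computes aInner (and the set stays faithful)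
lemma bInner_cons (s : PySem.Set String) (l : List String) (x : String) (v : List String) :
    bInner s l (x :: v) = if PySem.Set.contains s x then bInner s l v
      else bInner (PySem.Set.add s x) (l ++ [x]) v := by
  cases hx : PySem.Set.contains s x with
  | true => simp only [bInner, List.foldl_cons, hx, if_true]
  | false => simp only [bInner, List.foldl_cons, hx, Bool.false_eq_true, if_false]

lemma aInner_cons (x : String) (v l : List String) :
    aInner (x :: v) l = if l.contains x then aInner v l else aInner v (l ++ [x]) := by
  cases hx : l.contains x with
  | true => simp only [aInner, List.foldl_cons, hx, if_true]
  | false => simp only [aInner, List.foldl_cons, hx, Bool.false_eq_true, if_false]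

lemma scontains_eq (s : PySem.Set String) (x : String) :
    PySem.Set.contains s x = List.contains s x := rfl

lemma contains_append_one (l : List String) (x y : String) :
    List.contains (l ++ [x]) y = (List.contains l y || y == x) := by
  by_cases hyx : y = x <;> simp [hyx]

lemma bInner_spec (v : List String) : ∀ (s : PySem.Set String) (l : List String),
    (∀ x, List.contains s x = List.contains l x) →
    (bInner s l v).2 = aInner v l ∧
      (∀ x, List.contains ((bInner s l v).1) x = List.contains (aInner v l) x) := by
  induction v with
  | nil => intro s l h; exact ⟨rfl, h⟩
  | cons x v ih =>
    intro s l h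
    rw [bInner_cons, aInner_cons, scontains_eq]
    cases hx : List.contains s x with
    | true =>
      have hl : List.contains l x = true := by rw [← h]; exact hx
      rw [hl]
      simp only [reduceIte]
      exact ih s l h
    | false =>
      have hl : List.contains l x = false := by rw [← h]; exact hx
      rw [hl]
      simp only [Bool.false_eq_true, reduceIte]
      have hadd : PySem.Set.add s x = s ++ [x] := by
        simp only [PySem.Set.add, scontains_eq, hx, Bool.false_eq_true, if_false]
      refine ih _ _ ?_
      intro y
      rw [hadd, contains_append_one, contains_append_one, h y]

lemma aInner_append (u v l : List String) : aInner (u ++ v) l = aInner v (aInner u l) :=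
  List.foldl_append

-- the per-entry merge applied by A when there is a match
def gmap (b : String × List String) (a : String × List String) : String × List String :=
  if b.1 == a.1 then (a.1, aInner b.2 a.2) else a

lemma afold_none (b : String × List String) :
    ∀ (E : List (String × List String)) (acc : List (String × List String)) (fl : Bool),
    E.foldl (fun (p : List (String × List String) × Bool) itemA =>
      if b.1 == itemA.1 then (p.1 ++ [(itemA.1, aInner b.2 itemA.2)], true)
      else (p.1 ++ [itemA], p.2)) (acc, fl)
    = (acc ++ E.map (gmap b), fl || E.any (fun a => b.1 == a.1)) := by
  intro E
  induction E with
  | nil => intro acc fl; simp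
  | cons a E ih =>
    intro acc fl
    simp only [List.foldl_cons, List.map_cons, List.any_cons]
    cases hx : (b.1 == a.1) with
    | true =>
      simp only [reduceIte]
      rw [ih]
      simp [gmap, hx]
    | false =>
      simp only [Bool.false_eq_true, reduceIte]
      rw [ih]
      simp [gmap, hx]

lemma aStep_none (E : List (String × List String)) (b : String × List String) :
    aStep none E b = if E.any (fun a => b.1 == a.1) then E.map (gmap b) else E ++ [b] := by
  simp only [aStep, afold_none, Bool.false_or]
  cases h : E.any (fun a => b.1 == a.1) with
  | true => simp
  | false =>
    simp only [Bool.false_eq_true, reduceIte]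
    have : ∀ a ∈ E, gmap b a = a := by
      intro a ha
      have hf := List.any_eq_false.mp h a ha
      simp only [Bool.not_eq_true] at hf
      simp [gmap, hf]
    rw [List.map_congr_left this]
    simp

def gsome (t : String) (b : String × List String) (a : String × List String) :
    String × List String :=
  if a.1 == t && b.1 == a.1 then (a.1, aInner b.2 a.2) else a

lemma afold_some (t : String) (b : String × List String) :
    ∀ (E : List (String × List String)) (acc : List (String × List String)) (fl : Bool),
    E.foldl (fun (p : List (String × List String) × Bool) itemA =>
      if itemA.1 == t && b.1 == itemA.1 then (p.1 ++ [(itemA.1, aInner b.2 itemA.2)], true)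
      else (p.1 ++ [itemA], p.2)) (acc, fl)
    = (acc ++ E.map (gsome t b), fl || E.any (fun a => a.1 == t && b.1 == a.1)) := by
  intro E
  induction E with
  | nil => intro acc fl; simp
  | cons a E ih =>
    intro acc fl
    simp only [List.foldl_cons, List.map_cons, List.any_cons]
    cases hx : (a.1 == t && b.1 == a.1) with
    | true =>
      simp only [reduceIte]
      rw [ih]
      simp [gsome, hx]
    | false =>
      simp only [Bool.false_eq_true, reduceIte]
      rw [ih]
      simp [gsome, hx]

lemma aStep_some (t : String) (E : List (String × List String)) (b : String × List String) :
    aStep (some t) E b = E.map (gsome t b) := by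
  simp only [aStep]
  rw [afold_some]
  rfl

lemma foldl_map_comm {α β : Type} (g : β → α → α) :
    ∀ (l : List β) (E : List α),
    l.foldl (fun E b => E.map (g b)) E = E.map (fun a => l.foldl (fun a b => g b a) a) := by
  intro l
  induction l with
  | nil => intro E; simp
  | cons b l ih => intro E; simp [ih, Function.comp_def]

-- per-entry collapse of A's attribute-loop to one merged stream
lemma attr_entry_eq (t : String) (i01 : List (String × List String)) :
    ∀ (a : String × List String),
    i01.foldl (fun a b => gsome t b a) a
    = (if a.1 == t then (a.1, aInner ((i01.filter (fun p => p.1 == t)).flatMap (fun p => p.2)) a.2)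
       else a) := by
  induction i01 with
  | nil =>
    intro a
    cases h : (a.1 == t) with
    | true => simp only [reduceIte]; simp [aInner]
    | false => simp only [Bool.false_eq_true, reduceIte, List.foldl_nil]
  | cons b i01 ih =>
    intro a
    simp only [List.foldl_cons]
    cases h : (a.1 == t) with
    | true =>
      have ht : a.1 = t := by simpa using h
      cases hb : (b.1 == t) with
      | true =>
        have hba : (b.1 == a.1) = true := by simp only [beq_iff_eq] at hb ⊢; rw [hb, ht]
        have hg : gsome t b a = (a.1, aInner b.2 a.2) := by
          simp only [gsome, h, hba, Bool.and_self, reduceIte]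
        rw [hg, ih]
        simp only [h, reduceIte, List.filter_cons, hb, List.flatMap_cons, aInner_append]
      | false =>
        have hba : (b.1 == a.1) = false := by
          simp only [beq_eq_false_iff_ne, ne_eq] at hb ⊢; rw [ht]; exact hb
        have hg : gsome t b a = a := by
          simp only [gsome, hba, Bool.and_false, Bool.false_eq_true, reduceIte]
        rw [hg, ih]
        simp only [h, reduceIte, List.filter_cons, hb, Bool.false_eq_true]
    | false =>
      have hg : gsome t b a = a := by
        simp only [gsome, h, Bool.false_and, Bool.false_eq_true, reduceIte]
      rw [hg, ih, if_neg (by simp [h]), if_neg (by simp)]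

-- ===== the attribute=None machinery =====

def matchIdx (E : List (String × List String)) (k : String) : List Nat :=
  (List.range E.length).filter (fun i => (E.getD i pvDflt).1 == k)

lemma mem_matchIdx (E : List (String × List String)) (k : String) (j : Nat) :
    j ∈ matchIdx E k ↔ j < E.length ∧ ((E.getD j pvDflt).1 == k) = true := by
  simp [matchIdx]

lemma matchIdx_nodup (E : List (String × List String)) (k : String) :
    (matchIdx E k).Nodup :=
  (List.nodup_range).filter _

lemma matchIdx_congr (E E' : List (String × List String)) (k : String)
    (hlen : E'.length = E.length)
    (hkey : ∀ j, j < E.length → (E'.getD j pvDflt).1 = (E.getD j pvDflt).1) :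
    matchIdx E' k = matchIdx E k := by
  unfold matchIdx
  rw [hlen]
  apply List.filter_congr
  intro j hj
  rw [hkey j (List.mem_range.mp hj)]

lemma matchIdx_append (E : List (String × List String)) (e : String × List String) (k : String) :
    matchIdx (E ++ [e]) k = matchIdx E k ++ (if e.1 == k then [E.length] else []) := by
  unfold matchIdx
  rw [List.length_append, List.length_singleton, List.range_succ, List.filter_append]
  congr 1
  · apply List.filter_congr
    intro j hj
    have hj' := List.mem_range.mp hj
    rw [List.getD_append _ _ _ _ hj']
  · simp only [List.filter_cons, List.filter_nil]
    have he : (E ++ [e]).getD E.length pvDflt = e := by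
      rw [List.getD_eq_getElem?_getD, List.getElem?_append_right (le_refl E.length)]
      simp
    rw [he]
  
lemma matchIdx_nil_iff (E : List (String × List String)) (b1 : String) :
    matchIdx E b1 = [] ↔ E.any (fun a => b1 == a.1) = false := by
  constructor
  · intro h
    rw [List.any_eq_false]
    intro a ha
    obtain ⟨j, hj, rfl⟩ := List.mem_iff_getElem.mp ha
    have hnm : j ∉ matchIdx E b1 := by simp [h]
    rw [mem_matchIdx] at hnm
    simp only [beq_iff_eq, not_and, hj, true_implies, List.getD_eq_getElem _ _ hj] at hnm ⊢
    exact fun hc => hnm hc.symm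
  · intro h
    rw [List.eq_nil_iff_forall_not_mem]
    intro j hjm
    rw [mem_matchIdx] at hjm
    rw [List.any_eq_false] at h
    have hm : E.getD j pvDflt ∈ E := by
      rw [List.getD_eq_getElem _ _ hjm.1]; exact List.getElem_mem _
    have := h _ hm
    simp only [beq_iff_eq] at this hjm
    exact this hjm.2.symm

-- the invariant tying B's state (entries, index, sets) to the canonical index
def StInv (E : List (String × List String)) (I : PySem.Dict String (List Nat))
    (X : List (PySem.Set String)) : Prop :=
  (∀ k, PySem.Dict.get? I k = if matchIdx E k = [] then none else some (matchIdx E k))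
  ∧ X.length = E.length
  ∧ (∀ j, j < E.length → ∀ x,
      List.contains (X.getD j PySem.Set.empty) x = List.contains ((E.getD j pvDflt).2) x)

lemma bIndex_spec (E : List (String × List String)) : ∀ k,
    PySem.Dict.get? (bIndex E) k = if matchIdx E k = [] then none else some (matchIdx E k) := by
  induction E using List.reverseRecOn with
  | nil => intro k; simp [bIndex, matchIdx, PySem.Dict.get?, PySem.Dict.empty]
  | append_singleton E e ih =>
    intro k
    have hz : (List.range (E ++ [e]).length).zip (E ++ [e])
        = (List.range E.length).zip E ++ [(E.length, e)] := by
      rw [List.length_append, List.length_singleton, List.range_succ,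
        List.zip_append (by simp)]
      simp
    rw [bIndex, hz, List.foldl_append]
    simp only [List.foldl_cons, List.foldl_nil]
    rw [matchIdx_append]
    by_cases hk : (e.1 == k) = true
    · have hek : e.1 = k := by simpa using hk
      subst hek
      rw [PySem.Dict.get?_insert_self]
      have hgd : PySem.Dict.getD (bIndex E) e.1 [] = matchIdx E e.1 := by
        rw [PySem.Dict.getD_eq_get?_getD, ih]
        by_cases h0 : matchIdx E e.1 = [] <;> simp [h0]
      rw [bIndex] at hgd
      rw [hgd]
      simp
    · have hek : k ≠ e.1 := by
        simp only [Bool.not_eq_true, beq_eq_false_iff_ne, ne_eq] at hk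
        exact fun h => hk h.symm
      rw [PySem.Dict.get?_insert_of_ne _ _ hek]
      have hih := ih k
      rw [bIndex] at hih
      rw [hih]
      simp only [Bool.not_eq_true] at hk
      simp [hk]

-- the fold over idxs touches exactly the positions in idxs
lemma fold_upd (b2 : List String) :
    ∀ (idxs : List Nat) (E : List (String × List String)) (I : PySem.Dict String (List Nat))
      (X : List (PySem.Set String)),
    idxs.Nodup → (∀ i ∈ idxs, i < E.length) → X.length = E.length →
    (∀ j, j < E.length → ∀ x,
      List.contains (X.getD j PySem.Set.empty) x = List.contains ((E.getD j pvDflt).2) x) →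
    (fun R =>
      R.2.1 = I ∧ R.1.length = E.length ∧ R.2.2.length = E.length ∧
      (∀ j, j < E.length → R.1.getD j pvDflt =
        if j ∈ idxs then ((E.getD j pvDflt).1, aInner b2 (E.getD j pvDflt).2)
        else E.getD j pvDflt) ∧
      (∀ j, j < E.length → ∀ x,
        List.contains (R.2.2.getD j PySem.Set.empty) x = List.contains ((R.1.getD j pvDflt).2) x))
    (idxs.foldl (fun st i =>
        let p := bInner (st.2.2.getD i PySem.Set.empty) (st.1.getD i pvDflt).2 b2
        (st.1.set i ((st.1.getD i pvDflt).1, p.2), st.2.1, st.2.2.set i p.1)) (E, I, X)) := by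
  intro idxs
  induction idxs with
  | nil =>
    intro E I X _ _ hlen hinv
    exact ⟨rfl, rfl, hlen, by intro j hj; simp, hinv⟩
  | cons i rest ih =>
    intro E I X hnd hbnd hlen hinv
    have hi : i < E.length := hbnd i (List.mem_cons_self)
    have hirest : i ∉ rest := (List.nodup_cons.mp hnd).1
    have hXi : i < X.length := by omega
    obtain ⟨hb2, hbc⟩ := bInner_spec b2 (X.getD i PySem.Set.empty) (E.getD i pvDflt).2
      (hinv i hi)
    set p := bInner (X.getD i PySem.Set.empty) (E.getD i pvDflt).2 b2 with hp
    set E1 := E.set i ((E.getD i pvDflt).1, p.2) with hE1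
    set X1 := X.set i p.1 with hX1
    have hE1len : E1.length = E.length := by simp [hE1]
    have hX1len : X1.length = X.length := by simp [hX1]
    have hE1get : ∀ j, j < E.length → E1.getD j pvDflt =
        if j = i then ((E.getD j pvDflt).1, aInner b2 (E.getD j pvDflt).2)
        else E.getD j pvDflt := by
      intro j hj
      by_cases hji : j = i
      · subst hji
        rw [if_pos rfl, hE1, hb2, List.getD_eq_getElem?_getD,
          List.getElem?_set_self (by simpa using hj)]
        simp
      · rw [if_neg hji, hE1, List.getD_eq_getElem?_getD,
          List.getElem?_set_ne (fun h => hji h.symm), ← List.getD_eq_getElem?_getD]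
    have hX1get : ∀ j, j < E.length → ∀ x,
        List.contains (X1.getD j PySem.Set.empty) x = List.contains ((E1.getD j pvDflt).2) x := by
      intro j hj x
      by_cases hji : j = i
      · subst hji
        rw [hE1get j hj, if_pos rfl]
        have hx1 : X1.getD j PySem.Set.empty = p.1 := by
          rw [hX1, List.getD_eq_getElem?_getD, List.getElem?_set_self (by omega)]
          simp
        rw [hx1]
        exact hbc x
      · have hx1 : X1.getD j PySem.Set.empty = X.getD j PySem.Set.empty := by
          rw [hX1, List.getD_eq_getElem?_getD, List.getElem?_set_ne (fun h => hji h.symm),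
            ← List.getD_eq_getElem?_getD]
        rw [hx1, hE1get j hj, if_neg hji]
        exact hinv j hj x
    have hmain := ih E1 I X1 (List.nodup_cons.mp hnd).2
      (by intro a ha; rw [hE1len]; exact hbnd a (List.mem_cons_of_mem _ ha))
      (by omega)
      (by rw [hE1len]; exact hX1get)
    simp only [List.foldl_cons]
    refine ⟨hmain.1, by rw [hmain.2.1, hE1len], by rw [hmain.2.2.1, hE1len], ?_, ?_⟩
    · intro j hj
      have hj1 : j < E1.length := by omega
      have h4 := hmain.2.2.2.1 j hj1
      rw [h4]
      by_cases hji : j = i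
      · subst hji
        rw [if_neg hirest, hE1get j hj, if_pos rfl, if_pos (List.mem_cons_self)]
      · by_cases hjr : j ∈ rest
        · rw [if_pos hjr, if_pos (List.mem_cons_of_mem _ hjr)]
          try rw [hE1get j hj, if_neg hji]
        · rw [if_neg hjr, if_neg (by simp [hji, hjr]), hE1get j hj, if_neg hji]
    · intro j hj
      exact hmain.2.2.2.2 j (by omega)

-- one step of B (attribute None) computes one step of A and preserves the invariant
lemma step_equiv (b : String × List String) (E : List (String × List String))
    (I : PySem.Dict String (List Nat)) (X : List (PySem.Set String)) (h : StInv E I X) :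
    (bStep (E, I, X) b).1 = aStep none E b ∧
      StInv (bStep (E, I, X) b).1 (bStep (E, I, X) b).2.1 (bStep (E, I, X) b).2.2 := by
  obtain ⟨h1, h2, h3⟩ := h
  rcases hg : PySem.Dict.get? I b.1 with _ | idxs
  · -- no key match: append
    have hnil : matchIdx E b.1 = [] := by
      by_contra hne
      rw [h1 b.1, if_neg hne] at hg
      simp at hg
    have hany : E.any (fun a => b.1 == a.1) = false := (matchIdx_nil_iff E b.1).mp hnil
    have hstep : bStep (E, I, X) b =
        (E ++ [(b.1, b.2)], PySem.Dict.insert I b.1 [E.length],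
          X ++ [PySem.Set.ofList b.2]) := by
      unfold bStep
      rw [show PySem.Dict.get? (E, I, X).2.1 b.1 = none from hg]
    rw [hstep, aStep_none, hany]
    simp only [Bool.false_eq_true, if_false]
    refine ⟨by simp, ?_, by simp [h2], ?_⟩
    · intro k
      by_cases hk : k = b.1
      · subst hk
        rw [PySem.Dict.get?_insert_self, matchIdx_append, hnil]
        simp
      · rw [PySem.Dict.get?_insert_of_ne _ _ hk, h1 k, matchIdx_append]
        have hne : (b.1 == k) = false := by
          simp only [beq_eq_false_iff_ne, ne_eq]
          exact fun h => hk h.symm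
        simp [hne]
    · intro j hj x
      simp only [List.length_append, List.length_singleton] at hj
      by_cases hje : j < E.length
      · have hX : (X ++ [PySem.Set.ofList b.2]).getD j PySem.Set.empty
            = X.getD j PySem.Set.empty := by
          rw [List.getD_eq_getElem?_getD, List.getElem?_append_left (by omega),
            ← List.getD_eq_getElem?_getD]
        have hE : (E ++ [(b.1, b.2)]).getD j pvDflt = E.getD j pvDflt := by
          rw [List.getD_eq_getElem?_getD, List.getElem?_append_left (by omega),
            ← List.getD_eq_getElem?_getD]
        rw [hX, hE]
        exact h3 j hje x
      · have hje' : j = E.length := by omega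
        subst hje'
        have hX : (X ++ [PySem.Set.ofList b.2]).getD E.length PySem.Set.empty
            = PySem.Set.ofList b.2 := by
          rw [List.getD_eq_getElem?_getD, ← h2,
            List.getElem?_append_right (le_refl X.length)]
          simp
        have hE : (E ++ [(b.1, b.2)]).getD E.length pvDflt = (b.1, b.2) := by
          rw [List.getD_eq_getElem?_getD, List.getElem?_append_right (le_refl E.length)]
          simp
        rw [hX, hE]
        exact contains_ofList b.2 x
  · -- key match: merge into every position in idxs
    have hidxs : idxs = matchIdx E b.1 := by
      by_cases hne : matchIdx E b.1 = []
      · rw [h1 b.1, if_pos hne] at hg; cases hg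
      · rw [h1 b.1, if_neg hne] at hg
        exact (Option.some_inj.mp hg).symm
    have hne : matchIdx E b.1 ≠ [] := by
      intro h0
      rw [h1 b.1, if_pos h0] at hg
      cases hg
    have hany : E.any (fun a => b.1 == a.1) = true := by
      by_contra hc
      simp only [Bool.not_eq_true] at hc
      exact hne ((matchIdx_nil_iff E b.1).mpr hc)
    set R := idxs.foldl (fun st i =>
        let p := bInner (st.2.2.getD i PySem.Set.empty) (st.1.getD i pvDflt).2 b.2
        (st.1.set i ((st.1.getD i pvDflt).1, p.2), st.2.1, st.2.2.set i p.1)) (E, I, X) with hR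
    have hstep : bStep (E, I, X) b = R := by
      unfold bStep
      rw [show PySem.Dict.get? (E, I, X).2.1 b.1 = some idxs from hg]
    obtain ⟨f1, f2, f3, f4, f5⟩ := fold_upd b.2 idxs E I X
      (hidxs ▸ matchIdx_nodup E b.1)
      (by intro a ha; rw [hidxs] at ha; exact ((mem_matchIdx E b.1 a).mp ha).1)
      h2 h3
    have hkey : ∀ j, j < E.length → (R.1.getD j pvDflt).1 = (E.getD j pvDflt).1 := by
      intro j hj
      rw [f4 j hj]
      by_cases hjm : j ∈ idxs
      · rw [if_pos hjm]
      · rw [if_neg hjm]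
    have hmain : R.1 = aStep none E b := by
      rw [aStep_none, hany, if_pos rfl]
      apply List.ext_getElem (by rw [f2]; simp)
      intro j hj1 hj2
      have hj : j < E.length := by rwa [f2] at hj1
      have hR1 : R.1[j] = R.1.getD j pvDflt := (List.getD_eq_getElem _ _ hj1).symm
      have hEj : E[j] = E.getD j pvDflt := (List.getD_eq_getElem _ _ hj).symm
      rw [List.getElem_map, hR1, hEj, f4 j hj]
      by_cases hjm : j ∈ idxs
      · have hk : ((E.getD j pvDflt).1 == b.1) = true := by
          rw [hidxs] at hjm; exact ((mem_matchIdx E b.1 j).mp hjm).2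
        have hk' : (b.1 == (E.getD j pvDflt).1) = true := by
          simp only [beq_iff_eq] at hk ⊢; exact hk.symm
        rw [if_pos hjm]
        simp only [gmap, hk', reduceIte]
      · have hk : ((E.getD j pvDflt).1 == b.1) = false := by
          rw [hidxs] at hjm
          by_contra hc
          simp only [Bool.not_eq_false] at hc
          exact hjm ((mem_matchIdx E b.1 j).mpr ⟨hj, hc⟩)
        have hk' : (b.1 == (E.getD j pvDflt).1) = false := by
          simp only [beq_eq_false_iff_ne, ne_eq] at hk ⊢
          exact fun h => hk h.symm
        rw [if_neg hjm]
        simp only [gmap, hk', Bool.false_eq_true, reduceIte]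
    rw [hstep]
    refine ⟨hmain, ?_, ?_, ?_⟩
    · intro k
      have hlen2 : (aStep none E b).length = E.length := by rw [← hmain, f2]
      have hkey2 : ∀ j, j < E.length →
          ((aStep none E b).getD j pvDflt).1 = (E.getD j pvDflt).1 := by
        intro j hj
        rw [← hmain]
        exact hkey j hj
      rw [f1, hmain, matchIdx_congr E (aStep none E b) k hlen2 hkey2, h1 k]
    · rw [f3, f2]
    · intro j hj x
      exact f5 j (f2 ▸ hj) x

lemma fold_equiv : ∀ (i1 : List (String × List String)) (E : List (String × List String))
    (I : PySem.Dict String (List Nat)) (X : List (PySem.Set String)), StInv E I X →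
    (i1.foldl bStep (E, I, X)).1 = i1.foldl (aStep none) E := by
  intro i1
  induction i1 with
  | nil => intro E I X _; rfl
  | cons b i1 ih =>
    intro E I X h
    obtain ⟨he, hinv⟩ := step_equiv b E I X h
    simp only [List.foldl_cons]
    have hx := ih (bStep (E, I, X) b).1 (bStep (E, I, X) b).2.1 (bStep (E, I, X) b).2.2 hinv
    rw [← he]
    exact hx

lemma entries_id (items00 : List (String × List String)) :
    items00.map (fun e => (e.1, e.2)) = items00 := by
  simp

lemma init_inv (E : List (String × List String)) :
    StInv E (bIndex E) (E.map (fun e => PySem.Set.ofList e.2)) := by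
  refine ⟨bIndex_spec E, by simp, ?_⟩
  intro j hj x
  rw [List.getD_eq_getElem?_getD, List.getElem?_map,
    List.getElem?_eq_getElem hj]
  simp only [Option.map_some, Option.getD_some]
  rw [contains_ofList, List.getD_eq_getElem _ _ hj]

-- ===== VERDICT (by name: the statement is the Claim_ definition above) =====
theorem merge_items_spec : Claim_equal_merge_items := by
  intro items00 items01 attribute_ _
  unfold Spec_merge_items merge_items merge_items_alt
  cases attribute_ with
  | none =>
    simp only [entries_id]
    rw [fold_equiv items01 items00 (bIndex items00)
      (items00.map (fun e => PySem.Set.ofList e.2)) (init_inv items00)]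
  | some t =>
    simp only [entries_id]
    have hstep : items01.foldl (aStep (some t)) items00
        = items00.map (fun a => items01.foldl (fun a b => gsome t b a) a) := by
      rw [← foldl_map_comm]
      apply PySem.List.foldl_congr_mem
      intro acc x _
      exact aStep_some t acc x
    rw [hstep]
    have hstream : items01.foldl (fun acc (p : String × List String) =>
        if p.1 == t then acc ++ p.2 else acc) ([] : List String)
        = (items01.filter (fun p => p.1 == t)).flatMap (fun p => p.2) := by
      rw [PySem.List.foldl_if_eq_foldl_filter, PySem.List.foldl_append_eq_flatMap]
      simp
    rw [hstream]
    apply List.map_congr_left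
    intro a _
    rw [attr_entry_eq]
    cases h : (a.1 == t) with
    | true =>
      simp only [reduceIte]
      rw [(bInner_spec ((items01.filter (fun p => p.1 == t)).flatMap (fun p => p.2))
        (PySem.Set.ofList a.2) a.2 (fun x => contains_ofList a.2 x)).1]
    | false =>
      simp only [Bool.false_eq_true, reduceIte]
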